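-- pv_equiv track=rewrite | github.com/LanLeZ/contract-ai-demo | backend/scripts/verify_text_splitting.py | _get_size_distribution
-- ===== SOURCE A (Python) =====
-- from typing import List, Dict, Tuple
--
-- def _get_size_distribution(sizes: List[int]) -> Dict:
--     """获取chunk大小分布"""
--     if not sizes:
--         return {}
--
--     # 定义大小区间
--     bins = [0, 100, 200, 300, 400, 500, 600, 700, 800, 900, 1000, float('inf')]
--     distribution = {}
--
--     for size in sizes:
--         for i in range(len(bins) - 1):
--             if bins[i] <= size < bins[i + 1]:
--                 label = f"{bins[i]}-{bins[i+1] if bins[i+1] != float('inf') else '+'}"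
--                 distribution[label] = distribution.get(label, 0) + 1
--                 break
--
--     return distribution
-- ===== SOURCE B (Python) =====
-- _LABELS = ["%d-%d" % (i * 100, (i + 1) * 100) for i in range(10)] + ["1000-+"]
--
-- def _get_size_distribution(sizes):
--     """获取chunk大小分布"""
--     distribution = {}
--     for size in sizes:
--         if size < 0:
--             continue
--         label = _LABELS[min(size // 100, 10)]
--         distribution[label] = distribution.get(label, 0) + 1
--     return distribution
-- ===== Notes on version B (the rewrite author's own statement) =====
-- stated objective: faster
-- what changed: Replaces A's inner 11-way scan over bin boundaries (with per-hit f-string label construction) by a direct arithmetic bucket index min(size//100,10) into a precomputed label table, skipping negative sizes.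
import Mathlib
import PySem

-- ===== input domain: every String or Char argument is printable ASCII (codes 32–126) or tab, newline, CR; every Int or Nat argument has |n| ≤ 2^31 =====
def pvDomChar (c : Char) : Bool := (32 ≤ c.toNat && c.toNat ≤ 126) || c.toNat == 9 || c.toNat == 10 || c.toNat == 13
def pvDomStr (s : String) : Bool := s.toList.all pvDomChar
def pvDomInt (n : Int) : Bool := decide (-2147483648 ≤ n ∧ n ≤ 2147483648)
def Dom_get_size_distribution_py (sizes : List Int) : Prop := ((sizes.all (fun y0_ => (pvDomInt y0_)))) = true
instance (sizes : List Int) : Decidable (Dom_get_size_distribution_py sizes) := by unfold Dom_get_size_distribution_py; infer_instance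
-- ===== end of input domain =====

-- B replaces A's inner 11-way scan over bin boundaries by a direct arithmetic
-- bucket index into a precomputed label table (objective: faster, measured).

-- ===== PORT A =====
-- bin boundaries; the final float('inf') boundary is represented by getElem? = none below
def pvBins : List Int := [0, 100, 200, 300, 400, 500, 600, 700, 800, 900, 1000]

-- inner 'for i in range(len(bins)-1)' loop with break: first matching bin updates the dict
def pvScanBins (size : Int) (d : PySem.Dict String Int) : List Nat → PySem.Dict String Int
  | [] => d
  | i :: rest =>
    let lo := pvBins.getD i 0
    let hi? := pvBins[i+1]?
    if (decide (lo ≤ size) && (match hi? with | some hi => decide (size < hi) | none => true)) then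
      let label := PySem.Int.toStr lo ++ "-" ++ (match hi? with | some hi => PySem.Int.toStr hi | none => "+")
      d.insert label (d.getD label 0 + 1)
    else pvScanBins size d rest

def get_size_distribution_py (sizes : List Int) : List (String × Int) :=
  if sizes.isEmpty then []
  else (sizes.foldl (fun d size => pvScanBins size d (List.range 11)) PySem.Dict.empty).items

-- ===== PORT B =====
def pvLabels : List String :=
  ["0-100", "100-200", "200-300", "300-400", "400-500", "500-600", "600-700",
   "700-800", "800-900", "900-1000", "1000-+"]

def pvStepB (d : PySem.Dict String Int) (size : Int) : PySem.Dict String Int :=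
  if size < 0 then d
  else
    let label := pvLabels.getD (min (PySem.Int.floordiv size 100) 10).toNat ""
    d.insert label (d.getD label 0 + 1)

def get_size_distribution_py_alt (sizes : List Int) : List (String × Int) :=
  (sizes.foldl pvStepB PySem.Dict.empty).items

-- ===== PRECONDITION & SPEC =====
def Spec_get_size_distribution_py (sizes : List Int) (out : List (String × Int)) : Prop := out = get_size_distribution_py_alt sizes
instance (sizes : List Int) (out : List (String × Int)) : Decidable (Spec_get_size_distribution_py sizes out) := by unfold Spec_get_size_distribution_py; infer_instance

-- ===== CLAIM (what is proved, stated in full; the proofs are below) =====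
def Claim_equal_get_size_distribution_py : Prop := ∀ (sizes : List Int), Dom_get_size_distribution_py sizes → Spec_get_size_distribution_py sizes (get_size_distribution_py sizes)

-- ===== LEMMAS AND PROOFS =====

lemma pvStep_eq (size : Int) (d : PySem.Dict String Int) :
    pvScanBins size d (List.range 11) = pvStepB d size := by
  have hr : List.range 11 = [0,1,2,3,4,5,6,7,8,9,10] := by decide
  rw [hr]
  simp only [pvScanBins, pvStepB, pvBins, List.getD]
  rcases show size < 0 ∨ (0 ≤ size ∧ size < 100) ∨ (100 ≤ size ∧ size < 200) ∨ (200 ≤ size ∧ size < 300) ∨ (300 ≤ size ∧ size < 400) ∨ (400 ≤ size ∧ size < 500) ∨ (500 ≤ size ∧ size < 600) ∨ (600 ≤ size ∧ size < 700) ∨ (700 ≤ size ∧ size < 800) ∨ (800 ≤ size ∧ size < 900) ∨ (900 ≤ size ∧ size < 1000) ∨ 1000 ≤ size by omega with h | h | h | h | h | h | h | h | h | h | h | h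
  · simp [show ¬ ((0:Int) ≤ size) from by omega, show ¬ ((100:Int) ≤ size) from by omega, show ¬ ((200:Int) ≤ size) from by omega, show ¬ ((300:Int) ≤ size) from by omega, show ¬ ((400:Int) ≤ size) from by omega, show ¬ ((500:Int) ≤ size) from by omega, show ¬ ((600:Int) ≤ size) from by omega, show ¬ ((700:Int) ≤ size) from by omega, show ¬ ((800:Int) ≤ size) from by omega, show ¬ ((900:Int) ≤ size) from by omega, show ¬ ((1000:Int) ≤ size) from by omega, show size < 0 from by omega]
  · have hm2 : (min (size / 100) 10).toNat = 0 := by omega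
    simp [show ((0:Int) ≤ size) from by omega, show (size < (100:Int)) from by omega, show ¬ (size < 0) from by omega, hm2, show PySem.Int.toStr 0 ++ "-" ++ PySem.Int.toStr 100 = "0-100" from by decide, pvLabels]
  · have hm2 : (min (size / 100) 10).toNat = 1 := by omega
    simp [show ((0:Int) ≤ size) from by omega, show ¬ (size < (100:Int)) from by omega, show ((100:Int) ≤ size) from by omega, show (size < (200:Int)) from by omega, show ¬ (size < 0) from by omega, hm2, show PySem.Int.toStr 100 ++ "-" ++ PySem.Int.toStr 200 = "100-200" from by decide, pvLabels]
  · have hm2 : (min (size / 100) 10).toNat = 2 := by omega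
    simp [show ((0:Int) ≤ size) from by omega, show ¬ (size < (100:Int)) from by omega, show ((100:Int) ≤ size) from by omega, show ¬ (size < (200:Int)) from by omega, show ((200:Int) ≤ size) from by omega, show (size < (300:Int)) from by omega, show ¬ (size < 0) from by omega, hm2, show PySem.Int.toStr 200 ++ "-" ++ PySem.Int.toStr 300 = "200-300" from by decide, pvLabels]
  · have hm2 : (min (size / 100) 10).toNat = 3 := by omega
    simp [show ((0:Int) ≤ size) from by omega, show ¬ (size < (100:Int)) from by omega, show ((100:Int) ≤ size) from by omega, show ¬ (size < (200:Int)) from by omega, show ((200:Int) ≤ size) from by omega, show ¬ (size < (300:Int)) from by omega, show ((300:Int) ≤ size) from by omega, show (size < (400:Int)) from by omega, show ¬ (size < 0) from by omega, hm2, show PySem.Int.toStr 300 ++ "-" ++ PySem.Int.toStr 400 = "300-400" from by decide, pvLabels]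
  · have hm2 : (min (size / 100) 10).toNat = 4 := by omega
    simp [show ((0:Int) ≤ size) from by omega, show ¬ (size < (100:Int)) from by omega, show ((100:Int) ≤ size) from by omega, show ¬ (size < (200:Int)) from by omega, show ((200:Int) ≤ size) from by omega, show ¬ (size < (300:Int)) from by omega, show ((300:Int) ≤ size) from by omega, show ¬ (size < (400:Int)) from by omega, show ((400:Int) ≤ size) from by omega, show (size < (500:Int)) from by omega, show ¬ (size < 0) from by omega, hm2, show PySem.Int.toStr 400 ++ "-" ++ PySem.Int.toStr 500 = "400-500" from by decide, pvLabels]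
  · have hm2 : (min (size / 100) 10).toNat = 5 := by omega
    simp [show ((0:Int) ≤ size) from by omega, show ¬ (size < (100:Int)) from by omega, show ((100:Int) ≤ size) from by omega, show ¬ (size < (200:Int)) from by omega, show ((200:Int) ≤ size) from by omega, show ¬ (size < (300:Int)) from by omega, show ((300:Int) ≤ size) from by omega, show ¬ (size < (400:Int)) from by omega, show ((400:Int) ≤ size) from by omega, show ¬ (size < (500:Int)) from by omega, show ((500:Int) ≤ size) from by omega, show (size < (600:Int)) from by omega, show ¬ (size < 0) from by omega, hm2, show PySem.Int.toStr 500 ++ "-" ++ PySem.Int.toStr 600 = "500-600" from by decide, pvLabels]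
  · have hm2 : (min (size / 100) 10).toNat = 6 := by omega
    simp [show ((0:Int) ≤ size) from by omega, show ¬ (size < (100:Int)) from by omega, show ((100:Int) ≤ size) from by omega, show ¬ (size < (200:Int)) from by omega, show ((200:Int) ≤ size) from by omega, show ¬ (size < (300:Int)) from by omega, show ((300:Int) ≤ size) from by omega, show ¬ (size < (400:Int)) from by omega, show ((400:Int) ≤ size) from by omega, show ¬ (size < (500:Int)) from by omega, show ((500:Int) ≤ size) from by omega, show ¬ (size < (600:Int)) from by omega, show ((600:Int) ≤ size) from by omega, show (size < (700:Int)) from by omega, show ¬ (size < 0) from by omega, hm2, show PySem.Int.toStr 600 ++ "-" ++ PySem.Int.toStr 700 = "600-700" from by decide, pvLabels]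
  · have hm2 : (min (size / 100) 10).toNat = 7 := by omega
    simp [show ((0:Int) ≤ size) from by omega, show ¬ (size < (100:Int)) from by omega, show ((100:Int) ≤ size) from by omega, show ¬ (size < (200:Int)) from by omega, show ((200:Int) ≤ size) from by omega, show ¬ (size < (300:Int)) from by omega, show ((300:Int) ≤ size) from by omega, show ¬ (size < (400:Int)) from by omega, show ((400:Int) ≤ size) from by omega, show ¬ (size < (500:Int)) from by omega, show ((500:Int) ≤ size) from by omega, show ¬ (size < (600:Int)) from by omega, show ((600:Int) ≤ size) from by omega, show ¬ (size < (700:Int)) from by omega, show ((700:Int) ≤ size) from by omega, show (size < (800:Int)) from by omega, show ¬ (size < 0) from by omega, hm2, show PySem.Int.toStr 700 ++ "-" ++ PySem.Int.toStr 800 = "700-800" from by decide, pvLabels]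
  · have hm2 : (min (size / 100) 10).toNat = 8 := by omega
    simp [show ((0:Int) ≤ size) from by omega, show ¬ (size < (100:Int)) from by omega, show ((100:Int) ≤ size) from by omega, show ¬ (size < (200:Int)) from by omega, show ((200:Int) ≤ size) from by omega, show ¬ (size < (300:Int)) from by omega, show ((300:Int) ≤ size) from by omega, show ¬ (size < (400:Int)) from by omega, show ((400:Int) ≤ size) from by omega, show ¬ (size < (500:Int)) from by omega, show ((500:Int) ≤ size) from by omega, show ¬ (size < (600:Int)) from by omega, show ((600:Int) ≤ size) from by omega, show ¬ (size < (700:Int)) from by omega, show ((700:Int) ≤ size) from by omega, show ¬ (size < (800:Int)) from by omega, show ((800:Int) ≤ size) from by omega, show (size < (900:Int)) from by omega, show ¬ (size < 0) from by omega, hm2, show PySem.Int.toStr 800 ++ "-" ++ PySem.Int.toStr 900 = "800-900" from by decide, pvLabels]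
  · have hm2 : (min (size / 100) 10).toNat = 9 := by omega
    simp [show ((0:Int) ≤ size) from by omega, show ¬ (size < (100:Int)) from by omega, show ((100:Int) ≤ size) from by omega, show ¬ (size < (200:Int)) from by omega, show ((200:Int) ≤ size) from by omega, show ¬ (size < (300:Int)) from by omega, show ((300:Int) ≤ size) from by omega, show ¬ (size < (400:Int)) from by omega, show ((400:Int) ≤ size) from by omega, show ¬ (size < (500:Int)) from by omega, show ((500:Int) ≤ size) from by omega, show ¬ (size < (600:Int)) from by omega, show ((600:Int) ≤ size) from by omega, show ¬ (size < (700:Int)) from by omega, show ((700:Int) ≤ size) from by omega, show ¬ (size < (800:Int)) from by omega, show ((800:Int) ≤ size) from by omega, show ¬ (size < (900:Int)) from by omega, show ((900:Int) ≤ size) from by omega, show (size < (1000:Int)) from by omega, show ¬ (size < 0) from by omega, hm2, show PySem.Int.toStr 900 ++ "-" ++ PySem.Int.toStr 1000 = "900-1000" from by decide, pvLabels]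
  · have hm2 : (min (size / 100) 10).toNat = 10 := by omega
    simp [show ((0:Int) ≤ size) from by omega, show ¬ (size < (100:Int)) from by omega, show ((100:Int) ≤ size) from by omega, show ¬ (size < (200:Int)) from by omega, show ((200:Int) ≤ size) from by omega, show ¬ (size < (300:Int)) from by omega, show ((300:Int) ≤ size) from by omega, show ¬ (size < (400:Int)) from by omega, show ((400:Int) ≤ size) from by omega, show ¬ (size < (500:Int)) from by omega, show ((500:Int) ≤ size) from by omega, show ¬ (size < (600:Int)) from by omega, show ((600:Int) ≤ size) from by omega, show ¬ (size < (700:Int)) from by omega, show ((700:Int) ≤ size) from by omega, show ¬ (size < (800:Int)) from by omega, show ((800:Int) ≤ size) from by omega, show ¬ (size < (900:Int)) from by omega, show ((900:Int) ≤ size) from by omega, show ¬ (size < (1000:Int)) from by omega, show ((1000:Int) ≤ size) from by omega, show ¬ (size < 0) from by omega, hm2, show PySem.Int.toStr 1000 ++ "-" ++ "+" = "1000-+" from by decide, pvLabels]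

lemma pvFold_eq (sizes : List Int) (d : PySem.Dict String Int) :
    sizes.foldl (fun d size => pvScanBins size d (List.range 11)) d = sizes.foldl pvStepB d := by
  induction sizes generalizing d with
  | nil => rfl
  | cons x xs ih => simp only [pvStep_eq]

-- ===== VERDICT (by name: the statement is the Claim_ definition above) =====
theorem get_size_distribution_py_spec : Claim_equal_get_size_distribution_py := by
  intro sizes _
  unfold Spec_get_size_distribution_py get_size_distribution_py get_size_distribution_py_alt
  cases sizes with
  | nil => rfl
  | cons x xs =>
    simp only [List.isEmpty_cons, Bool.false_eq_true, if_false, pvFold_eq]
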